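-- pv_equiv track=rewrite | github.com/vrthra-forks/GLRParser-notebook | testGLR.py | _k_paths
-- ===== SOURCE A (Python) =====
-- def _k_paths(g, k, parent):
--     if k == 1: return [[k] for k in g]
--     _k_1_paths = _k_paths(g, k-1, parent)
--     # attach parents to each of the _k_1_paths.
--     new_paths = []
--     for path in _k_1_paths:
--         if path[0] not in parent: continue
--         for p in parent[path[0]]:
--             new_paths.append([p] + path)
--     return new_paths
-- ===== SOURCE B (Python) =====
-- def _k_paths(g, k, parent):
--     out = []
--     for n in g:
--         cur = [[n]]
--         for _ in range(k - 1):
--             if not cur: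
--                 break
--             cur = [[p] + path for path in cur for p in parent.get(path[0], [])]
--         out.extend(cur)
--     return out
-- ===== Notes on version B (the rewrite author's own statement) =====
-- stated objective: alternative
-- what changed: Replaces the recursion on k (one global list of paths re-scanned per level) by an outer loop over each start node with an inner range(k-1) extension loop using dict.get and a flattening comprehension, concatenating per-node results.
import Mathlib
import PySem

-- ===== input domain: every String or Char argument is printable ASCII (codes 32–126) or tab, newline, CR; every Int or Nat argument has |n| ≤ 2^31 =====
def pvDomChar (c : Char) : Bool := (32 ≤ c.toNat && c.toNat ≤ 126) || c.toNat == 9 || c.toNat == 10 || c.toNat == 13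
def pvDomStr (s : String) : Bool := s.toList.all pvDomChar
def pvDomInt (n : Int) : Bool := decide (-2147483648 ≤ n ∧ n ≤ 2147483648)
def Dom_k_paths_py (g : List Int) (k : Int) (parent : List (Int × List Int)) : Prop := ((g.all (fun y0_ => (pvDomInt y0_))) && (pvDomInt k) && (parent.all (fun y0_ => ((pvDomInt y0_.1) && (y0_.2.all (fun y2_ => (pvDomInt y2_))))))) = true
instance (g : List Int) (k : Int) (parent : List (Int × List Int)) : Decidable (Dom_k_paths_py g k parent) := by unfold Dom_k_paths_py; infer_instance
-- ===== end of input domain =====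

-- B replaces A's recursion on k with a per-start-node iterative extension loop (alternative decomposition, same cost).


-- ===== PORT A =====
-- literal port of A's recursion on k; for k < 1 Python recurses forever (RecursionError),
-- excluded by Pre_, the 'k < 1 → []' branch is only a totality guard.
def k_paths_py (g : List Int) (k : Int) (parent : List (Int × List Int)) : List (List Int) :=
  if k = 1 then g.map (fun n => [n])
  else if k < 1 then []  -- unreachable under Pre_ (Python raises RecursionError here)
  else
    let k1 := k_paths_py g (k - 1) parent
    -- for path in _k_1_paths: if path[0] not in parent: continue; for p in parent[path[0]]: append([p]+path)
    k1.foldl (fun acc path =>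
      match PySem.List.pyGet? path 0 with
      | none => acc        -- path[0] IndexError: unreachable, paths are nonempty
      | some h =>
        match parent.lookup h with
        | none => acc                              -- path[0] not in parent
        | some ps => acc ++ ps.map (fun p => p :: path)) []
termination_by k.toNat
decreasing_by omega

-- ===== PORT B =====
-- one extension round: cur = [[p] + path for path in cur for p in parent.get(path[0], [])]
def pvStep (parent : List (Int × List Int)) (cur : List (List Int)) : List (List Int) :=
  cur.flatMap (fun path =>
    match PySem.List.pyGet? path 0 with
    | none => []
    | some h => ((parent.lookup h).getD []).map (fun p => p :: path))

-- the 'for _ in range(k-1): if not cur: break; cur = …' loop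
def pvExtend (parent : List (Int × List Int)) : Nat → List (List Int) → List (List Int)
  | 0, cur => cur
  | m + 1, cur => if cur = [] then cur else pvExtend parent m (pvStep parent cur)

def k_paths_py_alt (g : List Int) (k : Int) (parent : List (Int × List Int)) : List (List Int) :=
  g.foldl (fun out n => out ++ pvExtend parent (k - 1).toNat [[n]]) []

-- ===== PRECONDITION & SPEC =====
-- Pre_ excludes exactly k < 1, where Python A raises RecursionError (no base case is reached).
def Pre_k_paths_py (_g : List Int) (k : Int) (_parent : List (Int × List Int)) : Prop := 1 ≤ k
instance (g : List Int) (k : Int) (parent : List (Int × List Int)) : Decidable (Pre_k_paths_py g k parent) := by unfold Pre_k_paths_py; infer_instance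
def pvWitness_k_paths_py : List Int × Int × (List (Int × List Int)) := ([1, 2], 3, [(1, [2, 3]), (2, [1]), (3, [])])

def Spec_k_paths_py (g : List Int) (k : Int) (parent : List (Int × List Int)) (out : List (List Int)) : Prop := out = k_paths_py_alt g k parent
instance (g : List Int) (k : Int) (parent : List (Int × List Int)) (out : List (List Int)) : Decidable (Spec_k_paths_py g k parent out) := by unfold Spec_k_paths_py; infer_instance

-- ===== CLAIM (what is proved, stated in full; the proofs are below) =====
def Claim_equal_k_paths_py : Prop := ∀ (g : List Int) (k : Int) (parent : List (Int × List Int)), Dom_k_paths_py g k parent → Pre_k_paths_py g k parent → Spec_k_paths_py g k parent (k_paths_py g k parent)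

-- ===== LEMMAS AND PROOFS =====

-- A's inner loop is one pvStep round appended to the accumulator.
theorem k_paths_loop_eq_step (parent : List (Int × List Int)) (l : List (List Int)) (acc : List (List Int)) :
    l.foldl (fun acc path =>
      match PySem.List.pyGet? path 0 with
      | none => acc
      | some h =>
        match parent.lookup h with
        | none => acc
        | some ps => acc ++ ps.map (fun p => p :: path)) acc
    = acc ++ pvStep parent l := by
  have h : ∀ path : List Int, ∀ acc : List (List Int),
      (match PySem.List.pyGet? path 0 with
      | none => acc
      | some h =>
        match parent.lookup h with
        | none => acc
        | some ps => acc ++ ps.map (fun p => p :: path))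
      = acc ++ (match PySem.List.pyGet? path 0 with
        | none => []
        | some h => ((parent.lookup h).getD []).map (fun p => p :: path)) := by
    intro path acc
    cases hg : PySem.List.pyGet? path 0 with
    | none => simp
    | some h =>
      cases hd : parent.lookup h with
      | none => simp [hd]
      | some ps => simp [hd]
  calc l.foldl (fun acc path =>
      match PySem.List.pyGet? path 0 with
      | none => acc
      | some h =>
        match parent.lookup h with
        | none => acc
        | some ps => acc ++ ps.map (fun p => p :: path)) acc
      = l.foldl (fun acc path => acc ++ (match PySem.List.pyGet? path 0 with
        | none => []
        | some h => ((parent.lookup h).getD []).map (fun p => p :: path))) acc := by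
        apply PySem.List.foldl_congr_mem
        intro acc path _; exact h path acc
    _ = acc ++ pvStep parent l := PySem.List.foldl_append_eq_flatMap _ _ _

-- pvStep distributes over flatMap.
theorem pvStep_flatMap (parent : List (Int × List Int)) (g : List Int) (f : Int → List (List Int)) :
    pvStep parent (g.flatMap f) = g.flatMap (fun n => pvStep parent (f n)) := by
  induction g with
  | nil => rfl
  | cons x xs ih => simp only [List.flatMap_cons, pvStep, List.flatMap_append] at ih ⊢; rw [ih]

-- A on k = 1 + n equals n extension rounds from each singleton, concatenated.
theorem k_paths_eq_iter (g : List Int) (parent : List (Int × List Int)) :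
    ∀ n : Nat, k_paths_py g (1 + (n : Int)) parent = g.flatMap (fun x => (pvStep parent)^[n] [[x]]) := by
  intro n
  induction n with
  | zero =>
    rw [k_paths_py]
    norm_num
    induction g with
    | nil => rfl
    | cons x xs ih => simpa using ih
  | succ m ih =>
    rw [k_paths_py]
    have h1 : ¬ (1 + ((m + 1 : Nat) : Int) = 1) := by push_cast; omega
    have h2 : ¬ (1 + ((m + 1 : Nat) : Int) < 1) := by push_cast; omega
    rw [if_neg h1, if_neg h2]
    have h3 : (1 + ((m + 1 : Nat) : Int)) - 1 = 1 + (m : Int) := by push_cast; omega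
    simp only [h3, ih, k_paths_loop_eq_step, List.nil_append, pvStep_flatMap]
    refine List.flatMap_congr (fun x _ => ?_)
    rw [Function.iterate_succ_apply']

-- the early break on an empty path list does not change the result: pvStep [] = [].
theorem pvExtend_eq_iter (parent : List (Int × List Int)) (n : Nat) (cur : List (List Int)) :
    pvExtend parent n cur = (pvStep parent)^[n] cur := by
  induction n generalizing cur with
  | zero => rfl
  | succ m ih =>
    rw [pvExtend, Function.iterate_succ_apply]
    by_cases h : cur = []
    · subst h
      rw [if_pos rfl]
      clear ih
      induction m with
      | zero => rfl
      | succ j ihj => rw [Function.iterate_succ_apply]; exact ihj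
    · rw [if_neg h, ih]

-- ===== VERDICT (by name: the statement is the Claim_ definition above) =====
theorem k_paths_py_spec : Claim_equal_k_paths_py := by
  intro g k parent _ hpre
  unfold Spec_k_paths_py k_paths_py_alt
  have hk : k = 1 + ((k - 1).toNat : Int) := by
    have := Int.toNat_of_nonneg (a := k - 1) (by exact Int.sub_nonneg.mpr hpre)
    omega
  rw [hk, k_paths_eq_iter]
  have : ∀ n : Int, pvExtend parent ((1 + ((k - 1).toNat : Int)) - 1).toNat [[n]] = (pvStep parent)^[(k - 1).toNat] [[n]] := by
    intro n; rw [pvExtend_eq_iter]; norm_num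
  simp only [this, PySem.List.foldl_append_eq_flatMap, List.nil_append]
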